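-- pv_equiv track=rewrite | github.com/sharronesofer/visual_dm | backend/scripts/tasks/task56_phase5_cleanup_and_testing.py | _fix_circular_imports
-- ===== SOURCE A (Python) =====
-- def _fix_circular_imports(content: str) -> str:
--     """Fix circular import issues"""
--     # Add TYPE_CHECKING imports where needed
--     lines = content.split('\n')
--
--     # Check if we need to add TYPE_CHECKING
--     has_type_checking = any('TYPE_CHECKING' in line for line in lines)
--     has_imports_that_need_it = any('import' in line and 'backend.systems' in line for line in lines)
--
--     if has_imports_that_need_it and not has_type_checking:
--         # Find the first import line and add TYPE_CHECKING before it
--         for i, line in enumerate(lines):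
--             if line.strip().startswith('from ') or line.strip().startswith('import '):
--                 lines.insert(i, 'from typing import TYPE_CHECKING')
--                 lines.insert(i+1, '')
--                 lines.insert(i+2, 'if TYPE_CHECKING:')
--                 lines.insert(i+3, '    # Type-only imports to avoid circular dependencies')
--                 break
--
--     return '\n'.join(lines)
-- ===== SOURCE B (Python) =====
-- def _fix_circular_imports(content: str) -> str:
--     """Fix circular import issues (flat-string algorithm: substring test,
--     character-offset search, single string splice; no modified line list is
--     ever joined)."""
--     if 'TYPE_CHECKING' in content:
--         return content
--     offset = 0
--     for line in content.split('\n'):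
--         s = line.strip()
--         if s.startswith('from ') or s.startswith('import '):
--             if any('import' in l and 'backend.systems' in l
--                    for l in content.split('\n')):
--                 block = ('from typing import TYPE_CHECKING\n'
--                          '\n'
--                          'if TYPE_CHECKING:\n'
--                          '    # Type-only imports to avoid circular dependencies\n')
--                 return content[:offset] + block + content[offset:]
--             return content
--         offset += len(line) + 1
--     return content
-- ===== Notes on version B (the rewrite author's own statement) =====
-- stated objective: alternative
-- what changed: B works on the flat string instead of a line list: it tests TYPE_CHECKING by whole-string substring membership, accumulates the character offset of the first import line, and returns content[:offset] + block + content[offset:] with the block as one flat string literal, so it never inserts into or joins a modified line list.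
import Mathlib
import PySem

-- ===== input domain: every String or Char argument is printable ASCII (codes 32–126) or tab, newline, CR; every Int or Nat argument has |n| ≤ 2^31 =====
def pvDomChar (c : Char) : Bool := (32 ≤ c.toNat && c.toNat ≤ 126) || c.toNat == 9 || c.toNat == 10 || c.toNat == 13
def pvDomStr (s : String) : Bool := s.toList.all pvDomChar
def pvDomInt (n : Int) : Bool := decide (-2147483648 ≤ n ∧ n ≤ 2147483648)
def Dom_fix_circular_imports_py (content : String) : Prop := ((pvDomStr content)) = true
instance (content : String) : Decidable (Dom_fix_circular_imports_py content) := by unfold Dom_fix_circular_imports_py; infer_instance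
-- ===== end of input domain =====

-- B works on the flat string instead of a line list: it tests 'TYPE_CHECKING' by whole-string
-- membership, scans once for the character offset of the first import line, and splices one
-- block string with content[:off] + block + content[off:] — it never joins a modified line
-- list; objective: alternative.

-- ===== PORT A =====
-- line predicates shared by both Pythons' texts
def pvTC (l : String) : Bool := PySem.Str.isIn "TYPE_CHECKING" l
def pvNeeds (l : String) : Bool := PySem.Str.isIn "import" l && PySem.Str.isIn "backend.systems" l
def pvImportLine (l : String) : Bool :=
  PySem.Str.startswith (PySem.Str.strip l) "from " || PySem.Str.startswith (PySem.Str.strip l) "import "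

-- A's 'for i, line in enumerate(lines): if …: insert…; break' — the search part
def pvAFind : List (String × Nat) → Option Nat
  | [] => none
  | (l, i) :: rest => if pvImportLine l then some i else pvAFind rest

def fix_circular_imports_py (content : String) : String :=
  let lines := (PySem.Str.split? content "\n").getD []
  let hasTC := lines.any pvTC
  let need := lines.any pvNeeds
  let lines' :=
    if need && !hasTC then
      match pvAFind lines.zipIdx with
      | some i =>
          PySem.List.insert (PySem.List.insert (PySem.List.insert
            (PySem.List.insert lines (i : Int) "from typing import TYPE_CHECKING")
            ((i : Int) + 1) "") ((i : Int) + 2) "if TYPE_CHECKING:")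
            ((i : Int) + 3) "    # Type-only imports to avoid circular dependencies"
      | none => lines
    else lines
  PySem.Str.join "\n" lines'

-- ===== PORT B =====
-- B's block, one flat string (four lines, each '\n'-terminated)
def pvBlockStr : String :=
  "from typing import TYPE_CHECKING\n\nif TYPE_CHECKING:\n    # Type-only imports to avoid circular dependencies\n"

-- B's 'for line in …: if import-line: … return …; offset += len(line) + 1' — offset of the
-- first import line (none = the loop ran off the end)
def pvOffset : List String → Int → Option Int
  | [], _ => none
  | l :: rest, acc => if pvImportLine l then some acc else pvOffset rest (acc + PySem.Str.len l + 1)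

def fix_circular_imports_py_alt (content : String) : String :=
  if PySem.Str.isIn "TYPE_CHECKING" content then content
  else
    match pvOffset ((PySem.Str.split? content "\n").getD []) 0 with
    | some off =>
        if ((PySem.Str.split? content "\n").getD []).any pvNeeds then
          -- content[:offset] + block + content[offset:]  (Python str '+' = Lean String ++)
          PySem.Str.slice content none (some off) ++ pvBlockStr
            ++ PySem.Str.slice content (some off) none
        else content
    | none => content

-- ===== PRECONDITION & SPEC =====
def Spec_fix_circular_imports_py (content : String) (out : String) : Prop := out = fix_circular_imports_py_alt content
instance (content : String) (out : String) : Decidable (Spec_fix_circular_imports_py content out) := by unfold Spec_fix_circular_imports_py; infer_instance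

-- ===== CLAIM (what is proved, stated in full; the proofs are below) =====
def Claim_equal_fix_circular_imports_py : Prop := ∀ (content : String), Dom_fix_circular_imports_py content → Spec_fix_circular_imports_py content (fix_circular_imports_py content)

-- ===== LEMMAS AND PROOFS =====

-- structural recursion equivalent of splitOn · ['\n']
def splitNL : List Char → List (List Char)
  | [] => [[]]
  | c :: r =>
      if c = '\n' then [] :: splitNL r
      else
        match splitNL r with
        | [] => [[c]]          -- unreachable: splitNL is never []
        | h :: t => (c :: h) :: t

theorem splitNL_ne_nil (cs : List Char) : splitNL cs ≠ [] := by
  cases cs with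
  | nil => simp [splitNL]
  | cons c r =>
      simp only [splitNL]
      split
      · simp
      · cases splitNL r <;> simp

theorem go_spec (fuel : Nat) : ∀ (l cur : List Char) (acc : List (List Char)),
    l.length < fuel →
    PySem.Chars.splitOn.go ['\n'] fuel l cur acc =
      acc.reverse ++ (match splitNL l with
                      | [] => []
                      | h :: t => (cur.reverse ++ h) :: t) := by
  induction fuel with
  | zero => intro l cur acc h; omega
  | succ fuel ih =>
      intro l cur acc h
      cases l with
      | nil => simp [PySem.Chars.splitOn.go, splitNL]
      | cons c rest =>
          by_cases hc : c = '\n'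
          · subst hc
            have hpre : List.isPrefixOf ['\n'] ('\n' :: rest) = true := by
              simp [List.isPrefixOf]
            rw [PySem.Chars.splitOn.go]
            simp only [hpre, if_pos]
            rw [ih _ _ _ (by simpa using Nat.lt_of_succ_lt_succ h)]
            rcases hrec : splitNL rest with _ | ⟨h0, t0⟩
            · exact absurd hrec (splitNL_ne_nil rest)
            · simp [splitNL, hrec]
          · have hpre : List.isPrefixOf ['\n'] (c :: rest) = false := by
              simp [List.isPrefixOf]; exact fun h => hc h.symm
            rw [PySem.Chars.splitOn.go]
            simp only [hpre]
            rw [if_neg (by simp)]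
            rw [ih _ _ _ (by simpa using Nat.lt_of_succ_lt_succ h)]
            rcases hrec : splitNL rest with _ | ⟨h0, t0⟩
            · exact absurd hrec (splitNL_ne_nil rest)
            · simp [splitNL, hc, hrec]

theorem splitOn_eq_splitNL (cs : List Char) :
    PySem.Chars.splitOn cs ['\n'] = splitNL cs := by
  rw [PySem.Chars.splitOn, go_spec (cs.length + 1) cs [] [] (by omega)]
  rcases hrec : splitNL cs with _ | ⟨h0, t0⟩
  · exact absurd hrec (splitNL_ne_nil cs)
  · simp

theorem join_splitNL (cs : List Char) :
    PySem.Chars.join ['\n'] (splitNL cs) = cs := by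
  induction cs with
  | nil => simp [splitNL, PySem.Chars.join, List.intercalate]
  | cons c r ih =>
      by_cases hc : c = '\n'
      · subst hc
        rcases hrec : splitNL r with _ | ⟨h0, t0⟩
        · exact absurd hrec (splitNL_ne_nil r)
        · rw [hrec] at ih
          have hsp : splitNL ('\n' :: r) = [] :: h0 :: t0 := by simp [splitNL, hrec]
          rw [hsp, PySem.Chars.join_cons_cons]
          simp [ih]
      · rcases hrec : splitNL r with _ | ⟨h0, t0⟩
        · exact absurd hrec (splitNL_ne_nil r)
        · rw [hrec] at ih
          have hsp : splitNL (c :: r) = (c :: h0) :: t0 := by simp [splitNL, hc, hrec]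
          rw [hsp]
          cases t0 with
          | nil =>
              rw [PySem.Chars.join_singleton] at ih ⊢
              simp [ih]
          | cons t1 t2 =>
              rw [PySem.Chars.join_cons_cons] at ih ⊢
              simp [← ih]

-- every line is an infix of the text
theorem mem_splitNL_infix (cs : List Char) : ∀ l ∈ splitNL cs, l <:+: cs := by
  induction cs with
  | nil => simp [splitNL]
  | cons c r ih =>
      intro l hl
      by_cases hc : c = '\n'
      · subst hc
        rw [show splitNL ('\n' :: r) = [] :: splitNL r from by simp [splitNL]] at hl
        rcases List.mem_cons.mp hl with rfl | hl'
        · simp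
        · exact (ih l hl').trans (List.suffix_cons '\n' r).isInfix
      · rcases hrec : splitNL r with _ | ⟨h0, t0⟩
        · exact absurd hrec (splitNL_ne_nil r)
        · rw [show splitNL (c :: r) = (c :: h0) :: t0 from by simp [splitNL, hc, hrec]] at hl
          rcases List.mem_cons.mp hl with rfl | hl'
          · have hpre : h0 <+: r := by
              have hj := join_splitNL r
              rw [hrec] at hj
              cases t0 with
              | nil => rw [PySem.Chars.join_singleton] at hj; simp [hj]
              | cons t1 t2 =>
                  rw [PySem.Chars.join_cons_cons] at hj
                  exact ⟨_, by simpa [List.append_assoc] using hj⟩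
            exact (List.cons_prefix_cons.mpr ⟨rfl, hpre⟩).isInfix
          · have := ih l (hrec ▸ List.mem_cons_of_mem h0 hl')
            exact this.trans (List.suffix_cons c r).isInfix

-- a newline-free prefix lies inside the first line
theorem prefix_first_line (cs : List Char) : ∀ (sub : List Char), '\n' ∉ sub →
    sub <+: cs → ∀ h t, splitNL cs = h :: t → sub <+: h := by
  induction cs with
  | nil =>
      intro sub hnl hp h t hs
      rw [List.prefix_nil] at hp
      simp [hp]
  | cons c r ih =>
      intro sub hnl hp h t hs
      cases sub with
      | nil => simp
      | cons s0 s' =>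
          rw [List.cons_prefix_cons] at hp
          obtain ⟨rfl, hp'⟩ := hp
          have hc : s0 ≠ '\n' := fun he => hnl (he ▸ List.mem_cons_self)
          rcases hrec : splitNL r with _ | ⟨h0, t0⟩
          · exact absurd hrec (splitNL_ne_nil r)
          · rw [show splitNL (s0 :: r) = (s0 :: h0) :: t0 from by simp [splitNL, hc, hrec]] at hs
            injection hs with h1 h2
            subst h1; subst h2
            rw [List.cons_prefix_cons]
            exact ⟨rfl, ih s' (fun hm => hnl (List.mem_cons_of_mem _ hm)) hp' h0 t0 hrec⟩

-- a newline-free substring occurs in the text iff it occurs in some line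
theorem infix_lines (cs : List Char) : ∀ (sub : List Char), sub ≠ [] → '\n' ∉ sub →
    sub <:+: cs → ∃ l ∈ splitNL cs, sub <:+: l := by
  induction cs with
  | nil =>
      intro sub h0 hnl hi
      rw [List.infix_nil] at hi
      exact absurd hi h0
  | cons c r ih =>
      intro sub h0 hnl hi
      rcases List.infix_cons_iff.mp hi with hp | hi'
      · rcases hrec : splitNL (c :: r) with _ | ⟨h, t⟩
        · exact absurd hrec (splitNL_ne_nil _)
        · exact ⟨h, List.mem_cons_self, (prefix_first_line _ sub hnl hp h t hrec).isInfix⟩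
      · obtain ⟨l, hl, hsl⟩ := ih sub h0 hnl hi'
        by_cases hc : c = '\n'
        · subst hc
          exact ⟨l, by rw [show splitNL ('\n' :: r) = [] :: splitNL r from by simp [splitNL]];
                       exact List.mem_cons_of_mem _ hl, hsl⟩
        · rcases hrec : splitNL r with _ | ⟨hh, t0⟩
          · exact absurd hrec (splitNL_ne_nil r)
          · rw [hrec] at hl
            rw [show splitNL (c :: r) = (c :: hh) :: t0 from by simp [splitNL, hc, hrec]]
            rcases List.mem_cons.mp hl with rfl | hl'
            · exact ⟨c :: l, List.mem_cons_self, hsl.trans (List.suffix_cons c l).isInfix⟩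
            · exact ⟨l, List.mem_cons_of_mem _ hl', hsl⟩

-- a newline-free substring occurs in the text iff it occurs in some line
theorem isIn_lines (cs sub : List Char) (h0 : sub ≠ []) (hnl : '\n' ∉ sub) :
    PySem.Chars.isIn sub cs = (splitNL cs).any (fun l => PySem.Chars.isIn sub l) := by
  by_cases h : PySem.Chars.isIn sub cs = true
  · rw [h]
    obtain ⟨l, hl, hsl⟩ := infix_lines cs sub h0 hnl ((PySem.Chars.isIn_iff_infix sub cs).mp h)
    exact (List.any_eq_true.mpr ⟨l, hl, (PySem.Chars.isIn_iff_infix sub l).mpr hsl⟩).symm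
  · rw [Bool.not_eq_true] at h
    rw [h]
    symm
    rw [List.any_eq_false]
    intro l hl
    rw [Bool.not_eq_true, PySem.Chars.isIn_eq_false_iff sub l]
    intro hsl
    rw [PySem.Chars.isIn_eq_false_iff sub cs] at h
    exact h (hsl.trans (mem_splitNL_infix cs l hl))

def pvBlock4 : List String :=
  ["from typing import TYPE_CHECKING", "", "if TYPE_CHECKING:",
   "    # Type-only imports to avoid circular dependencies"]

-- A's four list.insert calls at i..i+3 are one slice concatenation
theorem pv_insert4 (xs : List String) (i : Nat) (h : i ≤ xs.length) :
    PySem.List.insert (PySem.List.insert (PySem.List.insert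
      (PySem.List.insert xs (i : Int) "from typing import TYPE_CHECKING")
      ((i : Int) + 1) "") ((i : Int) + 2) "if TYPE_CHECKING:")
      ((i : Int) + 3) "    # Type-only imports to avoid circular dependencies"
    = xs.take i ++ pvBlock4 ++ xs.drop i := by
  have h1 : ((i : Int) + 1) = ((i + 1 : Nat) : Int) := by push_cast; ring
  have h2 : ((i : Int) + 2) = ((i + 2 : Nat) : Int) := by push_cast; ring
  have h3 : ((i : Int) + 3) = ((i + 3 : Nat) : Int) := by push_cast; ring
  have ht : (xs.take i).length = i := by simp; omega
  rw [PySem.List.insert_natCast xs i _ h, h1,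
      PySem.List.insert_natCast _ (i+1) _ (by simp; omega), h2,
      PySem.List.insert_natCast _ (i+2) _ (by simp; omega), h3,
      PySem.List.insert_natCast _ (i+3) _ (by simp; omega)]
  simp [pvBlock4, List.take_append, List.drop_append, ht, List.take_of_length_le,
        List.drop_eq_nil_of_le]

-- A's search loop is findIdx? (shifted by the enumeration start)
theorem pv_afind_char (ls : List String) (k : Nat) :
    pvAFind (ls.zipIdx k) = (ls.findIdx? pvImportLine).map (· + k) := by
  induction ls generalizing k with
  | nil => simp [pvAFind]
  | cons x xs ih =>
      simp only [List.zipIdx_cons, pvAFind, List.findIdx?_cons]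
      by_cases h : pvImportLine x
      · simp [h]
      · simp [h, ih, Option.map_map]
        cases hf : xs.findIdx? pvImportLine <;> simp [Nat.add_comm 1 k]

theorem pv_fidx_lt (p : String → Bool) (ls : List String) (i : Nat)
    (h : ls.findIdx? p = some i) : i < ls.length := by
  induction ls generalizing i with
  | nil => simp at h
  | cons x xs ih =>
      rw [List.findIdx?_cons] at h
      split at h
      · simp at h; simp [← h]
      · cases hf : xs.findIdx? p <;> rw [hf] at h <;> simp at h
        have := ih _ hf; simp; omega

-- B's offset loop: shift rule, none-characterisation
theorem pvOffset_shift (ls : List String) (a : Int) :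
    pvOffset ls a = (pvOffset ls 0).map (a + ·) := by
  induction ls generalizing a with
  | nil => simp [pvOffset]
  | cons l rest ih =>
      simp only [pvOffset]
      by_cases h : pvImportLine l
      · simp [h]
      · rw [if_neg h, if_neg h, ih, ih (0 + PySem.Str.len l + 1), Option.map_map]
        cases pvOffset rest 0
        · simp
        · simp
          ring

theorem pvOffset_none_iff (ls : List String) :
    pvOffset ls 0 = none ↔ ls.findIdx? pvImportLine = none := by
  induction ls with
  | nil => simp [pvOffset]
  | cons l rest ih =>
      simp only [pvOffset, List.findIdx?_cons]
      by_cases h : pvImportLine l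
      · simp [h]
      · rw [if_neg h, if_neg (by simp [h]), pvOffset_shift]
        cases hr : pvOffset rest 0 <;> cases hf : rest.findIdx? pvImportLine <;>
          simp_all

-- insertion before the first import line, structurally
def insRecS : List String → List String
  | [] => []
  | l :: rest => if pvImportLine l then pvBlock4 ++ l :: rest else l :: insRecS rest

theorem take_drop_eq_insRecS (ls : List String) (i : Nat)
    (h : ls.findIdx? pvImportLine = some i) :
    ls.take i ++ pvBlock4 ++ ls.drop i = insRecS ls := by
  induction ls generalizing i with
  | nil => simp at h
  | cons l rest ih =>
      rw [List.findIdx?_cons] at h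
      by_cases hl : pvImportLine l
      · rw [if_pos hl] at h
        injection h with h; subst h
        simp [insRecS, hl]
      · rw [if_neg hl] at h
        cases hf : rest.findIdx? pvImportLine <;> rw [hf] at h
        · simp at h
        · simp only [Option.map_some] at h
          injection h with h; subst h
          simp [insRecS, hl, ← ih _ hf, List.append_assoc]

-- the splice identity: joining the inserted line list = splicing the block string at the offset
theorem pvOffset_nonneg (ls : List String) (o : Int) (h : pvOffset ls 0 = some o) : 0 ≤ o := by
  induction ls generalizing o with
  | nil => simp [pvOffset] at h
  | cons l rest ih =>
      simp only [pvOffset] at h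
      by_cases hl : pvImportLine l
      · rw [if_pos hl] at h; injection h with h; omega
      · rw [if_neg hl, pvOffset_shift] at h
        cases hr : pvOffset rest 0 <;> rw [hr] at h
        · simp at h
        · simp only [Option.map_some] at h
          injection h with h
          have := ih _ hr
          have hlen : (0 : Int) ≤ PySem.Str.len l := by
            rw [PySem.Str.len_eq]; positivity
          omega

theorem insRecS_ne_nil (ls : List String) (h : ls ≠ []) : insRecS ls ≠ [] := by
  cases ls with
  | nil => exact absurd rfl h
  | cons l rest =>
      simp only [insRecS]
      split <;> simp [pvBlock4]

set_option maxHeartbeats 1600000 in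
theorem splice_main (ls : List String) : ∀ (off : Nat), pvOffset ls 0 = some (off : Int) →
    PySem.Chars.join ['\n'] ((insRecS ls).map String.toList) =
      (PySem.Chars.join ['\n'] (ls.map String.toList)).take off
        ++ pvBlockStr.toList
        ++ (PySem.Chars.join ['\n'] (ls.map String.toList)).drop off := by
  induction ls with
  | nil => intro off h; simp [pvOffset] at h
  | cons l rest ih =>
      intro off h
      simp only [pvOffset] at h
      by_cases hl : pvImportLine l
      · rw [if_pos hl] at h
        have h2 := Option.some.inj h
        have hoff : off = 0 := by omega
        subst hoff
        simp only [insRecS, if_pos hl, List.take_zero, List.drop_zero, List.nil_append]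
        have hblock : pvBlockStr.toList =
            "from typing import TYPE_CHECKING".toList ++ ['\n'] ++ ("".toList ++ ['\n'] ++
              ("if TYPE_CHECKING:".toList ++ ['\n'] ++
                ("    # Type-only imports to avoid circular dependencies".toList ++ ['\n']))) := by
          rfl
        simp only [pvBlock4, List.map_cons, List.cons_append, List.nil_append]
        rw [PySem.Chars.join_cons_cons, PySem.Chars.join_cons_cons,
            PySem.Chars.join_cons_cons, PySem.Chars.join_cons_cons, hblock]
        simp
      · rw [if_neg hl, pvOffset_shift] at h
        cases hr : pvOffset rest 0 <;> rw [hr] at h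
        · simp at h
        · rename_i o
          simp only [Option.map_some] at h
          have h2 := Option.some.inj h
          have ho : 0 ≤ o := pvOffset_nonneg rest o hr
          have hrest : rest ≠ [] := by
            intro he; rw [he] at hr; simp [pvOffset] at hr
          have hlen : PySem.Str.len l = (l.toList.length : Int) := PySem.Str.len_eq l
          have hoff : off = l.toList.length + 1 + o.toNat := by omega
          have hro : pvOffset rest 0 = some ((o.toNat : Nat) : Int) := by
            rw [hr]; congr 1; omega
          have ihr := ih o.toNat hro
          have hjoin : ∀ (s : String) (ms : List String), ms ≠ [] →
              PySem.Chars.join ['\n'] ((s :: ms).map String.toList) =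
                s.toList ++ ['\n'] ++ PySem.Chars.join ['\n'] (ms.map String.toList) := by
            intro s ms hm
            cases ms with
            | nil => exact absurd rfl hm
            | cons a b =>
                simp only [List.map_cons]
                rw [PySem.Chars.join_cons_cons]
          have hL : insRecS (l :: rest) = l :: insRecS rest := by
            simp [insRecS, hl]
          rw [hL, hjoin l (insRecS rest) (insRecS_ne_nil rest hrest), hjoin l rest hrest,
              hoff]
          have hsplit : ∀ (J : List Char) (n : Nat),
              (l.toList ++ ['\n'] ++ J).take (l.toList.length + 1 + n) =
                l.toList ++ '\n' :: J.take n ∧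
              (l.toList ++ ['\n'] ++ J).drop (l.toList.length + 1 + n) = J.drop n := by
            intro J n
            constructor
            · rw [List.append_assoc, List.take_append,
                  List.take_of_length_le (by omega : l.toList.length ≤ l.toList.length + 1 + n),
                  show l.toList.length + 1 + n - l.toList.length = n + 1 by omega]
              simp [List.take_succ_cons]
            · rw [List.append_assoc, List.drop_append,
                  List.drop_eq_nil_of_le (by omega : l.toList.length ≤ l.toList.length + 1 + n),
                  show l.toList.length + 1 + n - l.toList.length = n + 1 by omega]
              simp [List.drop_succ_cons]
          rw [(hsplit _ o.toNat).1, (hsplit _ o.toNat).2, ihr]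
          simp [List.append_assoc]

theorem pv_split_eq (content : String) :
    PySem.Str.split? content "\n" = some ((splitNL content.toList).map String.ofList) := by
  rw [PySem.Str.split?]
  have : PySem.Chars.split? content.toList ("\n" : String).toList
      = some (splitNL content.toList) := by
    rw [PySem.Chars.split?]
    rw [if_neg (by simp)]
    rw [show ("\n" : String).toList = ['\n'] from rfl, splitOn_eq_splitNL]
  rw [this, Option.map_some]

theorem fix_circular_imports_py_spec : Claim_equal_fix_circular_imports_py := by
  intro content _
  unfold Spec_fix_circular_imports_py fix_circular_imports_py fix_circular_imports_py_alt
  simp only [pv_split_eq content, Option.getD_some]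
  have hmap : ((splitNL content.toList).map String.ofList).map String.toList
      = splitNL content.toList := by
    simp [List.map_map, Function.comp_def]
  have hJoin : ∀ (ms : List String), ms.map String.toList = splitNL content.toList →
      PySem.Str.join "\n" ms = content := by
    intro ms hm
    apply String.toList_inj.mp
    rw [PySem.Str.toList_join, hm, show ("\n" : String).toList = ['\n'] from rfl,
        join_splitNL]
  have hTC : ((splitNL content.toList).map String.ofList).any pvTC
      = PySem.Str.isIn "TYPE_CHECKING" content := by
    have h2 : pvTC ∘ String.ofList = fun l => PySem.Chars.isIn "TYPE_CHECKING".toList l := by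
      funext l
      simp [pvTC, PySem.Str.isIn_eq]
    rw [List.any_map, h2,
        ← isIn_lines content.toList "TYPE_CHECKING".toList (by decide) (by decide)]
    simp [PySem.Str.isIn_eq]
  by_cases htc : PySem.Str.isIn "TYPE_CHECKING" content = true
  · rw [if_pos htc]
    rw [htc] at hTC
    simp only [hTC, Bool.not_true, Bool.and_false, Bool.false_eq_true, if_false]
    exact hJoin _ hmap
  · rw [if_neg htc]
    rw [Bool.not_eq_true] at htc
    rw [htc] at hTC
    cases hoff : pvOffset ((splitNL content.toList).map String.ofList) 0 with
    | none =>
        have hfi : ((splitNL content.toList).map String.ofList).findIdx? pvImportLine = none :=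
          (pvOffset_none_iff _).mp hoff
        have hAF : pvAFind ((splitNL content.toList).map String.ofList).zipIdx = none := by
          rw [pv_afind_char _ 0, hfi, Option.map_none]
        by_cases hneed : ((splitNL content.toList).map String.ofList).any pvNeeds = true
        · simp only [hneed, hTC, Bool.not_false, Bool.and_true, if_true, hAF]
          exact hJoin _ hmap
        · rw [Bool.not_eq_true] at hneed
          simp only [hneed, hTC, Bool.not_false, Bool.and_true, Bool.false_eq_true, if_false]
          exact hJoin _ hmap
    | some off =>
        have honn : 0 ≤ off := pvOffset_nonneg _ _ hoff
        have hoff' : pvOffset ((splitNL content.toList).map String.ofList) 0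
            = some ((off.toNat : Nat) : Int) := by
          rw [hoff]; congr 1; omega
        by_cases hneed : ((splitNL content.toList).map String.ofList).any pvNeeds = true
        · -- both sides insert the block
          have hfi : ∃ i, ((splitNL content.toList).map String.ofList).findIdx? pvImportLine
              = some i := by
            cases hf : ((splitNL content.toList).map String.ofList).findIdx? pvImportLine with
            | none =>
                rw [(pvOffset_none_iff _).mpr hf] at hoff
                exact absurd hoff (by simp)
            | some i => exact ⟨i, rfl⟩
          obtain ⟨i, hfi⟩ := hfi
          have hAF : pvAFind ((splitNL content.toList).map String.ofList).zipIdx = some i := by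
            rw [pv_afind_char _ 0, hfi, Option.map_some]
            simp
          have hilt : i ≤ ((splitNL content.toList).map String.ofList).length :=
            le_of_lt (pv_fidx_lt _ _ _ hfi)
          simp only [hneed, hTC, Bool.not_false, Bool.and_true, if_true, hAF]
          rw [pv_insert4 _ i hilt, take_drop_eq_insRecS _ i hfi]
          apply String.toList_inj.mp
          rw [PySem.Str.toList_join, show ("\n" : String).toList = ['\n'] from rfl,
              splice_main _ off.toNat hoff', hmap, join_splitNL]
          rw [String.toList_append, String.toList_append,
              PySem.Str.toList_slice, PySem.Str.toList_slice,
              PySem.Chars.slice_eq_listSlice, PySem.Chars.slice_eq_listSlice,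
              PySem.List.slice_to _ honn, PySem.List.slice_from _ honn]
        · rw [Bool.not_eq_true] at hneed
          simp only [hneed, hTC, Bool.not_false, Bool.and_true, Bool.false_eq_true, if_false]
          exact hJoin _ hmap
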